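-- pv_equiv track=rewrite | github.com/dagahan/AMLS | backend/src/storage/db/problem_type_tree.py | build_problem_type_tree_lines
-- ===== SOURCE A (Python) =====
-- from collections import defaultdict
--
-- def build_problem_type_tree_lines(
--     problem_type_data: tuple[tuple[str, str | None], ...],
-- ) -> tuple[str, ...]:
--     child_names_by_parent: dict[str, list[str]] = defaultdict(list)
--     root_names: list[str] = []
--     seen_problem_type_names: set[str] = set()
--
--     for problem_type_name, prerequisite_name in problem_type_data:
--         if problem_type_name in seen_problem_type_names:
--             continue
--         seen_problem_type_names.add(problem_type_name)
--
--         if prerequisite_name is None: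
--             root_names.append(problem_type_name)
--             continue
--
--         child_names_by_parent[prerequisite_name].append(problem_type_name)
--
--     lines: list[str] = []
--     for root_name in root_names:
--         _append_problem_type_tree_lines(
--             problem_type_name=root_name,
--             child_names_by_parent=child_names_by_parent,
--             indent_level=0,
--             lines=lines,
--         )
--
--     return tuple(lines)
--
-- def _append_problem_type_tree_lines(
--     problem_type_name: str,
--     child_names_by_parent: dict[str, list[str]],
--     indent_level: int,
--     lines: list[str],
-- ) -> None:
--     lines.append(("  " * indent_level) + problem_type_name)
--
--     for child_name in child_names_by_parent.get(problem_type_name, []):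
--         _append_problem_type_tree_lines(
--             problem_type_name=child_name,
--             child_names_by_parent=child_names_by_parent,
--             indent_level=indent_level + 1,
--             lines=lines,
--         )
-- ===== SOURCE B (Python) =====
-- def build_problem_type_tree_lines(
--     problem_type_data: tuple[tuple[str, str | None], ...],
-- ) -> tuple[str, ...]:
--     child_names_by_parent: dict[str, list[str]] = {}
--     root_names: list[str] = []
--     seen_problem_type_names: set[str] = set()
--
--     for problem_type_name, prerequisite_name in problem_type_data:
--         if problem_type_name in seen_problem_type_names:
--             continue
--         seen_problem_type_names.add(problem_type_name)
--
--         if prerequisite_name is None: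
--             root_names.append(problem_type_name)
--             continue
--
--         child_names_by_parent.setdefault(prerequisite_name, []).append(problem_type_name)
--
--     # Explicit stack-based pre-order DFS instead of the recursive helper.
--     lines: list[str] = []
--     stack: list[tuple[str, int]] = [(root_name, 0) for root_name in reversed(root_names)]
--     while stack:
--         name, level = stack.pop()
--         lines.append(("  " * level) + name)
--         for child_name in reversed(child_names_by_parent.get(name, [])):
--             stack.append((child_name, level + 1))
--
--     return tuple(lines)
-- ===== Notes on version B (the rewrite author's own statement) =====
-- stated objective: alternative
-- what changed: The recursive tree-printing helper is replaced by an explicit stack-based iterative pre-order DFS (nodes paired with their indent level, children pushed in reversed order), inlined into the main function; the first dedup/grouping pass is kept.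
import Mathlib
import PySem

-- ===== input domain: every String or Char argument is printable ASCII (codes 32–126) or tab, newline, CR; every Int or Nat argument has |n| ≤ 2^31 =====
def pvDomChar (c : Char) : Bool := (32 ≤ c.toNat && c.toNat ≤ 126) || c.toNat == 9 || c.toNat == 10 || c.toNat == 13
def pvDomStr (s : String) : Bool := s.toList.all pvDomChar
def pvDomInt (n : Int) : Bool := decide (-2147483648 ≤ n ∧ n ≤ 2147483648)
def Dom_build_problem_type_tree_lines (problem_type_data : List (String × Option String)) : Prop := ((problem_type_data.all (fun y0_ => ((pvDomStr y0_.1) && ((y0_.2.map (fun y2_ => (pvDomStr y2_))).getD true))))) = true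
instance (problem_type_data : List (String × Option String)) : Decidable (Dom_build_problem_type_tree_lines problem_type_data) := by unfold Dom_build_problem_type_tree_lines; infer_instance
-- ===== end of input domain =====

-- B replaces A's recursive tree-printing helper by an explicit stack-based iterative
-- pre-order DFS (objective: alternative decomposition; the shared first pass is kept).

-- ("  " * indent_level) + problem_type_name
def pvLine (lvl : Nat) (name : String) : String :=
  String.ofList (List.replicate (2 * lvl) ' ' ++ name.toList)

-- The first pass, identical in A and B: dedup by name, split into roots (prerequisite
-- None) and a children dict keyed by prerequisite (defaultdict(list)/setdefault append).
def pvFirstPass (problem_type_data : List (String × Option String)) :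
    PySem.Dict String (List String) × List String :=
  let st := problem_type_data.foldl
    (fun (st : PySem.Dict String (List String) × List String × PySem.Set String) p =>
      let (d, roots, seen) := st
      if PySem.Set.contains seen p.1 then st
      else
        let seen := PySem.Set.add seen p.1
        match p.2 with
        | none => (d, roots ++ [p.1], seen)
        | some pre => (d.modify pre [] (fun l => l ++ [p.1]), roots, seen))
    (PySem.Dict.empty, [], PySem.Set.empty)
  (st.1, st.2.1)

-- ===== PORT A =====
-- _append_problem_type_tree_lines, made total by a fuel guard threaded through the
-- sibling loop (one unit per emitted line; the guard is never reached for the fuel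
-- passed at the entry point, which bounds the number of emitted lines).
mutual
def pvRecNode (d : PySem.Dict String (List String)) : Nat → String → Nat → List String
  | 0, _, _ => []
  | f + 1, name, lvl => pvLine lvl name :: pvRecKids d f (d.getD name []) (lvl + 1)
  termination_by f _ _ => (f, 0)
  decreasing_by exact Prod.Lex.left _ _ (Nat.lt_succ_self f)

def pvRecKids (d : PySem.Dict String (List String)) : Nat → List String → Nat → List String
  | _, [], _ => []
  | f, c :: cs, lvl =>
    pvRecNode d f c lvl ++ pvRecKids d (f - (pvRecNode d f c lvl).length) cs lvl
  termination_by f cs _ => (f, cs.length)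
  decreasing_by
    all_goals simp only [List.length_cons]
    · exact Prod.Lex.right _ (Nat.succ_pos _)
    · generalize List.length _ = L
      rcases Nat.eq_or_lt_of_le (Nat.sub_le f L) with h | h
      · rw [h]; exact Prod.Lex.right _ (Nat.lt_succ_self _)
      · exact Prod.Lex.left _ _ h
end

def build_problem_type_tree_lines (problem_type_data : List (String × Option String)) : List String :=
  let (d, roots) := pvFirstPass problem_type_data
  -- the loop over root_names, each node at indent 0; fuel = number of input rows,
  -- an upper bound on the lines emitted (each line is a distinct deduped name)
  pvRecKids d problem_type_data.length roots 0

-- ===== PORT B =====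
-- the while-loop over the explicit stack; the stack is represented head-first
-- (head = top), so Source B's "push reversed(children)" is children-in-order prepended,
-- and the initial stack of reversed(root_names) is roots-in-order.  Same fuel guard.
def pvLoop (d : PySem.Dict String (List String)) : Nat → List (String × Nat) → List String → List String
  | _, [], lines => lines
  | 0, _ :: _, lines => lines
  | f + 1, (name, lvl) :: rest, lines =>
    pvLoop d f ((d.getD name []).map (fun c => (c, lvl + 1)) ++ rest)
      (lines ++ [pvLine lvl name])

def build_problem_type_tree_lines_alt (problem_type_data : List (String × Option String)) : List String :=
  let (d, roots) := pvFirstPass problem_type_data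
  pvLoop d problem_type_data.length (roots.map (fun r => (r, 0))) []

-- ===== PRECONDITION & SPEC =====
def Spec_build_problem_type_tree_lines (problem_type_data : List (String × Option String)) (out : List String) : Prop := out = build_problem_type_tree_lines_alt problem_type_data
instance (problem_type_data : List (String × Option String)) (out : List String) : Decidable (Spec_build_problem_type_tree_lines problem_type_data out) := by unfold Spec_build_problem_type_tree_lines; infer_instance

-- ===== CLAIM (what is proved, stated in full; the proofs are below) =====
def Claim_equal_build_problem_type_tree_lines : Prop := ∀ (problem_type_data : List (String × Option String)), Dom_build_problem_type_tree_lines problem_type_data → Spec_build_problem_type_tree_lines problem_type_data (build_problem_type_tree_lines problem_type_data)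

-- ===== LEMMAS AND PROOFS =====

theorem pvLoop_nil (d : PySem.Dict String (List String)) (f : Nat) (acc : List String) :
    pvLoop d f [] acc = acc := by cases f <;> rfl

theorem pvLoop_zero (d : PySem.Dict String (List String)) (st : List (String × Nat)) (acc : List String) :
    pvLoop d 0 st acc = acc := by cases st <;> rfl

-- The stack machine with fuel f run on a frame (name/names at level lvl) on top of s
-- produces exactly the recursion's output for that frame, consuming one fuel unit per
-- line, then continues with s.  Proved for EVERY fuel, jointly by strong induction.
theorem pvLoop_eq_rec (d : PySem.Dict String (List String)) :
    ∀ f : Nat,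
      (∀ name lvl s acc, pvLoop d f ((name, lvl) :: s) acc =
        pvLoop d (f - (pvRecNode d f name lvl).length) s (acc ++ pvRecNode d f name lvl)) ∧
      (∀ names lvl s acc, pvLoop d f (names.map (fun n => (n, lvl)) ++ s) acc =
        pvLoop d (f - (pvRecKids d f names lvl).length) s (acc ++ pvRecKids d f names lvl)) := by
  intro f
  induction f using Nat.strong_induction_on with
  | _ f IH =>
    have hnode : ∀ name lvl s acc, pvLoop d f ((name, lvl) :: s) acc =
        pvLoop d (f - (pvRecNode d f name lvl).length) s (acc ++ pvRecNode d f name lvl) := by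
      intro name lvl s acc
      match f with
      | 0 => simp [pvLoop, pvRecNode, pvLoop_zero]
      | g + 1 =>
        rw [pvLoop]
        conv_rhs => rw [pvRecNode]
        have h2 := (IH g (Nat.lt_succ_self g)).2 (d.getD name []) (lvl + 1) s (acc ++ [pvLine lvl name])
        rw [h2]
        simp [Nat.succ_sub_succ]
    refine ⟨hnode, ?_⟩
    -- inner induction over the sibling list, fuel generalized to any g ≤ f
    suffices hk : ∀ names, ∀ g ≤ f, ∀ lvl s acc,
        pvLoop d g (names.map (fun n => (n, lvl)) ++ s) acc =
        pvLoop d (g - (pvRecKids d g names lvl).length) s (acc ++ pvRecKids d g names lvl) by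
      intro names lvl s acc; exact hk names f le_rfl lvl s acc
    intro names
    induction names with
    | nil => intro g _ lvl s acc; simp [pvRecKids]
    | cons c cs ihcs =>
      intro g hg lvl s acc
      have hL1 : pvLoop d g ((c, lvl) :: (cs.map (fun n => (n, lvl)) ++ s)) acc =
          pvLoop d (g - (pvRecNode d g c lvl).length) (cs.map (fun n => (n, lvl)) ++ s)
            (acc ++ pvRecNode d g c lvl) := by
        rcases Nat.eq_or_lt_of_le hg with rfl | hlt
        · exact hnode c lvl _ acc
        · exact (IH g hlt).1 c lvl _ acc
      have hL2 := ihcs (g - (pvRecNode d g c lvl).length)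
        (le_trans (Nat.sub_le _ _) hg) lvl s (acc ++ pvRecNode d g c lvl)
      rw [List.map_cons, List.cons_append, hL1, hL2]
      conv_rhs => rw [pvRecKids]
      simp [Nat.sub_sub, List.append_assoc]

-- ===== VERDICT (by name: the statement is the Claim_ definition above) =====
theorem build_problem_type_tree_lines_spec : Claim_equal_build_problem_type_tree_lines := by
  intro data _
  unfold Spec_build_problem_type_tree_lines build_problem_type_tree_lines build_problem_type_tree_lines_alt
  have h := (pvLoop_eq_rec (pvFirstPass data).1 data.length).2 (pvFirstPass data).2 0 [] []
  simp only [List.append_nil, List.nil_append, pvLoop_nil] at h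
  exact h.symm
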